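-- pv_equiv track=rewrite | github.com/Chenxiao-Tian/Data_Collection | src/data_collection/sources/open_data.py | _market_bucket_from_categories
-- ===== SOURCE A (Python) =====
-- from typing import Any, Dict, Iterable, List, Optional
--
-- def _market_bucket_from_categories(categories: Iterable[str]) -> str:
--     if not categories:
--         return "Unknown"
--     normalized = {str(cat).lower() for cat in categories}
--     if normalized & {"artificial intelligence", "machine learning", "ai"}:
--         return "Large"
--     if normalized & {"fintech", "financial services"}:
--         return "Large"
--     if normalized & {"security", "privacy", "compliance"}:
--         return "Medium"
--     return "Small"
-- ===== SOURCE B (Python) =====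
-- _RANK = {
--     "artificial intelligence": 0,
--     "machine learning": 0,
--     "ai": 0,
--     "fintech": 0,
--     "financial services": 0,
--     "security": 1,
--     "privacy": 1,
--     "compliance": 1,
-- }
--
-- def _market_bucket_from_categories(categories):
--     if not categories:
--         return "Unknown"
--     best = 2
--     for cat in categories:
--         best = min(best, _RANK.get(str(cat).lower(), 2))
--     if best == 0:
--         return "Large"
--     if best == 1:
--         return "Medium"
--     return "Small"
-- ===== Notes on version B (the rewrite author's own statement) =====
-- stated objective: alternative
-- what changed: Replaced the build-a-set-then-three-set-intersections cascade by a single fold that tracks the minimum priority rank (0=Large,1=Medium,2=Small) of each category via one keyword-to-rank table, then maps the final rank to the bucket name.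
import Mathlib
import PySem

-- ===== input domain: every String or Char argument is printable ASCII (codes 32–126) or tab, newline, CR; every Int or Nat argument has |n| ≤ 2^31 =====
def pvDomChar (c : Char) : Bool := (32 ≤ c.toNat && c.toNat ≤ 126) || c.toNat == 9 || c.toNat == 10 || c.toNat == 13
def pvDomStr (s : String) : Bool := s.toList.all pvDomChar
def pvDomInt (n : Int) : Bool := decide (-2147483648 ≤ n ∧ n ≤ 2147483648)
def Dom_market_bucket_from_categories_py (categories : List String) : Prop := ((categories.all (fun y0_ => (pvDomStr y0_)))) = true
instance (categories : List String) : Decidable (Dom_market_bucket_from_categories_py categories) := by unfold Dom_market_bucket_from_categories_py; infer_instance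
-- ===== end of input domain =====

-- B replaces A's set-comprehension plus three set-intersection tests by one min-rank fold over a
-- keyword-to-rank table (objective: alternative decomposition, same O(n) cost).

-- ===== PORT A =====
def market_bucket_from_categories_py (categories : List String) : String :=
  if categories = [] then "Unknown"
  else
    let normalized : PySem.Set String := PySem.Set.ofList (categories.map PySem.Str.lower)
    if PySem.Set.inter normalized ["artificial intelligence", "machine learning", "ai"] ≠ [] then "Large"
    else if PySem.Set.inter normalized ["fintech", "financial services"] ≠ [] then "Large"
    else if PySem.Set.inter normalized ["security", "privacy", "compliance"] ≠ [] then "Medium"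
    else "Small"

-- ===== PORT B =====
def pvRank : PySem.Dict String Nat :=
  PySem.Dict.ofList
  [("artificial intelligence", 0), ("machine learning", 0), ("ai", 0),
   ("fintech", 0), ("financial services", 0),
   ("security", 1), ("privacy", 1), ("compliance", 1)]

def market_bucket_from_categories_py_alt (categories : List String) : String :=
  if categories = [] then "Unknown"
  else
    let best := categories.foldl (fun b cat => min b (pvRank.getD (PySem.Str.lower cat) 2)) 2
    if best = 0 then "Large"
    else if best = 1 then "Medium"
    else "Small"

-- ===== PRECONDITION & SPEC =====
def Spec_market_bucket_from_categories_py (categories : List String) (out : String) : Prop := out = market_bucket_from_categories_py_alt categories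
instance (categories : List String) (out : String) : Decidable (Spec_market_bucket_from_categories_py categories out) := by unfold Spec_market_bucket_from_categories_py; infer_instance

-- ===== CLAIM (what is proved, stated in full; the proofs are below) =====
def Claim_equal_market_bucket_from_categories_py : Prop := ∀ (categories : List String), Dom_market_bucket_from_categories_py categories → Spec_market_bucket_from_categories_py categories (market_bucket_from_categories_py categories)

-- ===== LEMMAS AND PROOFS =====

def pvG0 : List String :=
  ["artificial intelligence", "machine learning", "ai", "fintech", "financial services"]
def pvG1 : List String := ["security", "privacy", "compliance"]

theorem pvRank_getD_eq (s : String) :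
    pvRank.getD s 2 = (if s ∈ pvG0 then 0 else if s ∈ pvG1 then 1 else 2) := by
  simp only [pvRank, pvG0, pvG1, PySem.Dict.ofList, PySem.Dict.update, List.foldl,
    PySem.Dict.getD_insert, PySem.Dict.getD_empty, List.mem_cons, List.not_mem_nil, or_false]
  split_ifs <;> simp_all

theorem pv_inter_ne_nil {s t : List String} :
    PySem.Set.inter s t ≠ [] ↔ ∃ x ∈ s, x ∈ t := by
  rw [Ne, List.eq_nil_iff_forall_not_mem]
  simp [PySem.Set.mem_inter]

theorem pv_fold_char (l : List String) (b : Nat) (hb : b ≤ 2) :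
    l.foldl (fun a c => min a (pvRank.getD (PySem.Str.lower c) 2)) b =
      min b (if ∃ c ∈ l, PySem.Str.lower c ∈ pvG0 then 0
             else if ∃ c ∈ l, PySem.Str.lower c ∈ pvG1 then 1 else 2) := by
  induction l generalizing b with
  | nil => simp; omega
  | cons c l ih =>
    simp only [List.foldl_cons]
    rw [ih (min b _) (le_trans (Nat.min_le_left _ _) hb), pvRank_getD_eq]
    by_cases h0 : PySem.Str.lower c ∈ pvG0 <;>
      by_cases h1 : PySem.Str.lower c ∈ pvG1 <;>
        by_cases e0 : ∃ x ∈ l, PySem.Str.lower x ∈ pvG0 <;>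
          by_cases e1 : ∃ x ∈ l, PySem.Str.lower x ∈ pvG1 <;>
            simp_all [List.exists_mem_cons_iff] <;> split_ifs <;> omega

-- ===== VERDICT (by name: the statement is the Claim_ definition above) =====
set_option maxHeartbeats 1000000 in
theorem market_bucket_from_categories_py_spec : Claim_equal_market_bucket_from_categories_py := by
  intro categories _
  unfold Spec_market_bucket_from_categories_py
  unfold market_bucket_from_categories_py market_bucket_from_categories_py_alt
  by_cases hc : categories = []
  · simp [hc]
  · simp only [hc, if_false]
    rw [pv_fold_char _ 2 (le_refl 2)]
    have hmem : ∀ (ks : List String),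
        (PySem.Set.inter (PySem.Set.ofList (categories.map PySem.Str.lower)) ks ≠ []) ↔
          ∃ c ∈ categories, PySem.Str.lower c ∈ ks := by
      intro ks
      rw [pv_inter_ne_nil]
      constructor
      · rintro ⟨x, hx, hxk⟩
        rw [PySem.Set.mem_ofList, List.mem_map] at hx
        obtain ⟨c, hc', rfl⟩ := hx
        exact ⟨c, hc', hxk⟩
      · rintro ⟨c, hc', hk⟩
        exact ⟨PySem.Str.lower c, by rw [PySem.Set.mem_ofList, List.mem_map]; exact ⟨c, hc', rfl⟩, hk⟩
    simp only [hmem]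
    have hsplit : (∃ c ∈ categories, PySem.Str.lower c ∈ pvG0) ↔
        (∃ c ∈ categories, PySem.Str.lower c ∈
          (["artificial intelligence", "machine learning", "ai"] : List String)) ∨
        (∃ c ∈ categories, PySem.Str.lower c ∈
          (["fintech", "financial services"] : List String)) := by
      constructor
      · rintro ⟨c, hc', hk⟩
        simp only [pvG0, List.mem_cons, List.not_mem_nil, or_false] at hk
        rcases hk with h | h | h | h | h
        · exact Or.inl ⟨c, hc', by simp [h]⟩
        · exact Or.inl ⟨c, hc', by simp [h]⟩
        · exact Or.inl ⟨c, hc', by simp [h]⟩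
        · exact Or.inr ⟨c, hc', by simp [h]⟩
        · exact Or.inr ⟨c, hc', by simp [h]⟩
      · rintro (⟨c, hc', hk⟩ | ⟨c, hc', hk⟩) <;>
          exact ⟨c, hc', by simp only [pvG0, List.mem_cons] at *; tauto⟩
    simp only [hsplit, pvG1]
    by_cases hA : ∃ c ∈ categories, PySem.Str.lower c ∈
        (["artificial intelligence", "machine learning", "ai"] : List String) <;>
      by_cases hF : ∃ c ∈ categories, PySem.Str.lower c ∈
          (["fintech", "financial services"] : List String) <;>
        by_cases hS : ∃ c ∈ categories, PySem.Str.lower c ∈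
            (["security", "privacy", "compliance"] : List String) <;>
          simp only [hA, hF, hS, or_true, true_or, or_false, false_or, if_true, if_false,
            if_false] <;> rfl
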